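-- pv_equiv track=rewrite | github.com/mtrejo0/SchoolWork | 6.009/past/quiz1 March/q1_practice_a/quiz.py | trailing_weighted_average
-- ===== SOURCE A (Python) =====
-- def trailing_weighted_average(S, W):
--     ans = []
--
--     for i in range(len(S)):
--     	prod = 0
--     	for k in range(len(W)):
--     		wk = W[k]
--
--     		if(i-k<0):
--     			sik = S[0]
--     		else:
--     			sik = S[i-k]
--
--     		prod += wk * sik
--     	ans+=[prod]
--     return ans
-- ===== SOURCE B (Python) =====
-- def trailing_weighted_average(S, W):
--     # Loop interchange: instead of computing a dot product per output index,
--     # accumulate, weight by weight, a scaled clamp-shifted copy of S into the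
--     # output vector.
--     n = len(S)
--     ans = [0] * n
--     for k in range(len(W)):
--         w = W[k]
--         shifted = S[:1] * min(k, n) + S[:max(0, n - k)]
--         ans = [a + w * s for a, s in zip(ans, shifted)]
--     return ans
-- ===== Notes on version B (the rewrite author's own statement) =====
-- stated objective: alternative
-- what changed: Interchanges the loops: instead of A's per-output-index dot product with an in-loop clamp branch, B iterates over the weights and accumulates, for each weight, a scaled clamp-shifted copy of S into a running output vector (scatter/contribution form).
import Mathlib
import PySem

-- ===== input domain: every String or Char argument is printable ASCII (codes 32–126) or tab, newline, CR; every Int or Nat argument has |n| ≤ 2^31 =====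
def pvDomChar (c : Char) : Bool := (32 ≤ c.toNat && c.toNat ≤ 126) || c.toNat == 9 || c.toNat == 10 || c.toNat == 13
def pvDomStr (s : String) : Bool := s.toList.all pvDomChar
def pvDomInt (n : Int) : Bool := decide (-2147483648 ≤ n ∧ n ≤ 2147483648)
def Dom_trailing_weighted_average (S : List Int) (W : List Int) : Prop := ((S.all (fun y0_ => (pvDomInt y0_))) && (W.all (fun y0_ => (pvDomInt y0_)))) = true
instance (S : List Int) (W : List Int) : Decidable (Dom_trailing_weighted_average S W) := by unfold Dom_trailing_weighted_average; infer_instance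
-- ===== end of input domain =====

-- B interchanges the loops: it accumulates, weight by weight, a scaled clamp-shifted
-- copy of S into a running output vector instead of A's per-index dot product
-- (objective: alternative, same cost).

-- ===== PORT A =====
def trailing_weighted_average (S : List Int) (W : List Int) : List Int :=
  (PySem.List.pyRange 0 (S.length : Int) 1).foldl (fun ans i =>
    ans ++ [(PySem.List.pyRange 0 (W.length : Int) 1).foldl (fun prod k =>
      let wk := PySem.List.pyGetD W k 0
      let sik := if i - k < 0 then PySem.List.pyGetD S 0 0 else PySem.List.pyGetD S (i - k) 0
      prod + wk * sik) 0]) []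

-- ===== PORT B =====
-- shifted = S[:1] * min(k, n) + S[:max(0, n - k)]   (Nat subtraction is Python's max(0, n-k))
def pvShifted (S : List Int) (k : Nat) : List Int :=
  (List.replicate (min k S.length) (S.take 1)).flatten ++ S.take (S.length - k)

def trailing_weighted_average_alt (S : List Int) (W : List Int) : List Int :=
  (List.range W.length).foldl
    (fun ans k =>
      let w := W.getD k 0
      (ans.zip (pvShifted S k)).map (fun p => p.1 + w * p.2))
    (List.replicate S.length 0)

-- ===== PRECONDITION & SPEC =====
def Spec_trailing_weighted_average (S : List Int) (W : List Int) (out : List Int) : Prop := out = trailing_weighted_average_alt S W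
instance (S : List Int) (W : List Int) (out : List Int) : Decidable (Spec_trailing_weighted_average S W out) := by unfold Spec_trailing_weighted_average; infer_instance

-- ===== CLAIM =====
def Claim_equal_trailing_weighted_average : Prop := ∀ (S : List Int) (W : List Int), Dom_trailing_weighted_average S W → Spec_trailing_weighted_average S W (trailing_weighted_average S W)

-- ===== LEMMAS AND PROOFS =====

-- A's clamped sample at output index i for weight index k
def pvClamp (S : List Int) (i k : Nat) : Int :=
  if i < k then S.getD 0 0 else S.getD (i - k) 0

-- value accumulated by B for the weight indices in ks
def pvAcc (S W : List Int) (ks : List Nat) (i : Nat) : Int :=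
  (ks.map (fun k => W.getD k 0 * pvClamp S i k)).sum

theorem pvShifted_length (S : List Int) (k : Nat) :
    (pvShifted S k).length = S.length := by
  unfold pvShifted
  cases S with
  | nil => simp
  | cons x xs =>
    have h1 : (x :: xs).take 1 = [x] := rfl
    rw [h1]
    simp
    omega

theorem pvShifted_getD (S : List Int) (k i : Nat) (hi : i < S.length) :
    (pvShifted S k).getD i 0 = pvClamp S i k := by
  unfold pvShifted pvClamp
  obtain ⟨x, xs, rfl⟩ : ∃ x xs, S = x :: xs := by
    cases S with
    | nil => simp at hi
    | cons x xs => exact ⟨x, xs, rfl⟩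
  have hi' : i < xs.length + 1 := by simpa using hi
  have htk : (x :: xs).take 1 = [x] := rfl
  rw [htk]
  have hfl : (List.replicate (min k (x :: xs).length) [x]).flatten
      = List.replicate (min k (x :: xs).length) x := by
    generalize (min k (x :: xs).length) = m
    induction m with
    | zero => simp
    | succ m ih => simp [List.replicate_succ, ih]
  rw [hfl]
  rw [List.getD_eq_getElem?_getD]
  by_cases hik : i < k
  · rw [if_pos hik]
    rw [List.getElem?_append_left
      (by simp only [List.length_replicate, List.length_cons]; omega)]
    rw [List.getElem?_replicate, if_pos (by simp only [List.length_cons]; omega)]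
    simp
  · rw [if_neg hik]
    rw [List.getElem?_append_right
      (by simp only [List.length_replicate, List.length_cons]; omega)]
    simp only [List.length_replicate]
    have hmin : i - min k (x :: xs).length = i - k := by
      simp only [List.length_cons]; omega
    rw [hmin]
    rw [List.getElem?_take_of_lt (by simp only [List.length_cons]; omega)]
    rw [← List.getD_eq_getElem?_getD]

-- one accumulation step on a vector given as a map over range
theorem pvStep (S W : List Int) (k : Nat) (g : Nat → Int) :
    ((((List.range S.length).map g).zip (pvShifted S k)).map
        (fun p => p.1 + W.getD k 0 * p.2))
      = (List.range S.length).map (fun i => g i + W.getD k 0 * pvClamp S i k) := by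
  apply List.ext_getElem
  · simp [pvShifted_length]
  · intro i h1 h2
    have hi : i < S.length := by simpa using h2
    have hlen : i < (pvShifted S k).length := by rw [pvShifted_length]; exact hi
    simp only [List.getElem_map, List.getElem_zip, List.getElem_range]
    have hval : (pvShifted S k)[i] = pvClamp S i k := by
      rw [← pvShifted_getD S k i hi, List.getD_eq_getElem _ _ hlen]
    rw [hval]

-- B's fold, over any list of weight indices, starting from any mapped vector
theorem pvFold (S W : List Int) (ks : List Nat) (g : Nat → Int) :
    ks.foldl
      (fun ans k => (ans.zip (pvShifted S k)).map (fun p => p.1 + W.getD k 0 * p.2))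
      ((List.range S.length).map g)
    = (List.range S.length).map (fun i => g i + pvAcc S W ks i) := by
  induction ks generalizing g with
  | nil => simp [pvAcc]
  | cons k ks ih =>
    simp only [List.foldl_cons]
    rw [pvStep S W k g, ih]
    apply List.map_congr_left
    intro i _
    simp [pvAcc, add_assoc]

theorem pvB_eq (S W : List Int) :
    trailing_weighted_average_alt S W
      = (List.range S.length).map (fun i => pvAcc S W (List.range W.length) i) := by
  unfold trailing_weighted_average_alt
  have h0 : List.replicate S.length (0 : Int) = (List.range S.length).map (fun _ => 0) := by
    simp [List.map_const']
  rw [h0, pvFold S W (List.range W.length) (fun _ => 0)]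
  simp

theorem pvA_eq (S W : List Int) :
    trailing_weighted_average S W
      = (List.range S.length).map (fun i => pvAcc S W (List.range W.length) i) := by
  unfold trailing_weighted_average
  rw [PySem.List.foldl_append_singleton_eq_map]
  rw [PySem.List.pyRange_zero_natCast, PySem.List.pyRange_zero_natCast]
  simp only [List.map_map, List.nil_append]
  apply List.map_congr_left
  intro i hi
  simp only [List.mem_range] at hi
  rw [Function.comp]
  rw [List.foldl_map, PySem.List.foldl_add]
  simp only [zero_add, pvAcc]
  apply congrArg
  apply List.map_congr_left
  intro k hk
  simp only [List.mem_range] at hk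
  simp only [PySem.List.pyGetD_natCast, PySem.List.pyGetD_zero]
  unfold pvClamp
  by_cases hik : i < k
  · rw [if_pos (by omega : (i : Int) - (k : Int) < 0), if_pos hik]
  · rw [if_neg (by omega : ¬ ((i : Int) - (k : Int) < 0)), if_neg hik]
    have : (i : Int) - (k : Int) = ((i - k : Nat) : Int) := by omega
    rw [this, PySem.List.pyGetD_natCast]

-- ===== VERDICT =====
theorem trailing_weighted_average_spec : Claim_equal_trailing_weighted_average := by
  intro S W _
  unfold Spec_trailing_weighted_average
  rw [pvA_eq, pvB_eq]
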